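-- pv_equiv track=rewrite | github.com/mortyc126-debug/SHA | dimension/anomaly6_round0_carries.py | count_carries
-- ===== SOURCE A (Python) =====
-- def count_carries(x, y):
--     """Total carry bits in x + y."""
--     c = 0
--     carry = 0
--     for bit in range(32):
--         a = (x >> bit) & 1
--         b = (y >> bit) & 1
--         carry = (a & b) | (carry & (a ^ b))
--         c += carry
--     return c
-- ===== SOURCE B (Python) =====
-- def count_carries(x, y):
--     """Total carry bits in x + y."""
--     X = x & 0xFFFFFFFF
--     Y = y & 0xFFFFFFFF
--     return bin((X + Y) ^ X ^ Y).count('1')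
-- ===== Notes on version B (the rewrite author's own statement) =====
-- stated objective: simpler
-- what changed: Replaces the 32-iteration bit-by-bit carry simulation with a closed form: mask both operands to 32 bits and popcount the carry word (X+Y)^X^Y.
import Mathlib
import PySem

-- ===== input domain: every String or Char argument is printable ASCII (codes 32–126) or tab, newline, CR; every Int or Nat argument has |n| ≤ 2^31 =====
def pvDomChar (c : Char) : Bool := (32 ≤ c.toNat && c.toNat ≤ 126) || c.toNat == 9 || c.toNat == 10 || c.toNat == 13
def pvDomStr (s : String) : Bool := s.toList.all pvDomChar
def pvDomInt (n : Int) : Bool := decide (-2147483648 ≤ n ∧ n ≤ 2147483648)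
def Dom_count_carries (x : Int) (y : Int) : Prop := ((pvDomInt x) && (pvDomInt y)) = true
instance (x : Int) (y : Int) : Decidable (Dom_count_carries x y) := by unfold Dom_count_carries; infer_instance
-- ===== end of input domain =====

-- B replaces A's 32-iteration bit-by-bit carry simulation by a closed form: popcount of the carry word (X+Y)^X^Y of the 32-bit-masked operands.

-- ===== PORT A =====
-- 'bit' ranges over range(32), so it is nonnegative and 'bit.toNat' is exact for Python's 'x >> bit'.
def count_carries (x : Int) (y : Int) : Int :=
  ((PySem.List.pyRange 0 32).foldl (fun (st : Int × Int) bit =>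
    let a := PySem.Int.band (x >>> bit.toNat) 1
    let b := PySem.Int.band (y >>> bit.toNat) 1
    let carry := PySem.Int.bor (PySem.Int.band a b) (PySem.Int.band st.2 (PySem.Int.bxor a b))
    (st.1 + carry, carry)) ((0 : Int), (0 : Int))).1

-- ===== PORT B =====
-- bin(t).count('1') for the nonnegative t produced here is the popcount of |t|, i.e. PySem.Int.bitCount.
def count_carries_alt (x : Int) (y : Int) : Int :=
  let X := PySem.Int.band x 4294967295
  let Y := PySem.Int.band y 4294967295
  (PySem.Int.bitCount (PySem.Int.bxor (PySem.Int.bxor (X + Y) X) Y) : Int)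

-- ===== PRECONDITION & SPEC =====
def Spec_count_carries (x : Int) (y : Int) (out : Int) : Prop := out = count_carries_alt x y
instance (x : Int) (y : Int) (out : Int) : Decidable (Spec_count_carries x y out) := by unfold Spec_count_carries; infer_instance

-- ===== CLAIM (what is proved, stated in full; the proofs are below) =====
def Claim_equal_count_carries : Prop := ∀ (x : Int) (y : Int), Dom_count_carries x y → Spec_count_carries x y (count_carries x y)

-- ===== LEMMAS AND PROOFS =====

/-- Popcount of a natural number. -/
def natPop : Nat → Nat
  | 0 => 0
  | n+1 => natPop ((n+1)/2) + (n+1) % 2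
decreasing_by omega

theorem natPop_step (n : Nat) : natPop n = natPop (n/2) + n % 2 := by
  cases n with
  | zero => simp [natPop]
  | succ n => rw [natPop]

theorem bitCount_natPop (m : Nat) : PySem.Int.bitCount (m : Int) = natPop m := by
  induction m using Nat.strong_induction_on with
  | _ m ih =>
    rcases Nat.eq_zero_or_pos m with h | h
    · subst h
      rw [show ((0:Nat):Int) = 0 from rfl, PySem.Int.bitCount_zero]
      simp [natPop]
    · rw [PySem.Int.bitCount_natCast h, ih (m/2) (by omega), natPop_step m]; omega

theorem xor_decomp (a b : Nat) : a ^^^ b = 2*(a/2 ^^^ b/2) + (a % 2 ^^^ b % 2) := by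
  conv_lhs => rw [← Nat.bit_decide_mod_two_eq_one_shiftRight_one a,
                  ← Nat.bit_decide_mod_two_eq_one_shiftRight_one b]
  rw [Nat.xor_bit, Nat.bit_val, Nat.shiftRight_one, Nat.shiftRight_one]
  congr 1
  rcases Nat.mod_two_eq_zero_or_one a with h | h <;>
    rcases Nat.mod_two_eq_zero_or_one b with h' | h' <;> simp [h, h']

theorem xor_split : ∀ (n u v e d : Nat), u < 2^n → v < 2^n → e < 2 → d < 2 →
    (u + e*2^n) ^^^ (v + d*2^n) = (u ^^^ v) + (e ^^^ d)*2^n := by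
  intro n
  induction n with
  | zero =>
    intro u v e d hu hv he hd
    interval_cases u
    interval_cases v
    simp
  | succ n ih =>
    intro u v e d hu hv he hd
    have hp : (2:Nat)^(n+1) = 2*2^n := by rw [pow_succ]; ring
    rw [hp] at hu hv ⊢
    rw [xor_decomp (u + e*(2*2^n)) (v + d*(2*2^n)), xor_decomp u v]
    have h1 : (u + e*(2*2^n))/2 = u/2 + e*2^n := by
      rw [show e*(2*2^n) = (e*2^n)*2 from by ring, Nat.add_mul_div_right _ _ (by norm_num : (0:Nat) < 2)]
    have h2 : (u + e*(2*2^n)) % 2 = u % 2 := by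
      rw [show e*(2*2^n) = (e*2^n)*2 from by ring, Nat.add_mul_mod_self_right]
    have h3 : (v + d*(2*2^n))/2 = v/2 + d*2^n := by
      rw [show d*(2*2^n) = (d*2^n)*2 from by ring, Nat.add_mul_div_right _ _ (by norm_num : (0:Nat) < 2)]
    have h4 : (v + d*(2*2^n)) % 2 = v % 2 := by
      rw [show d*(2*2^n) = (d*2^n)*2 from by ring, Nat.add_mul_mod_self_right]
    rw [h1, h2, h3, h4, ih (u/2) (v/2) e d (by omega) (by omega) he hd]
    ring

theorem pop_split : ∀ (m t e : Nat), t < 2^m → e < 2 → natPop (t + e*2^m) = natPop t + e := by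
  intro m
  induction m with
  | zero =>
    intro t e ht he
    interval_cases t
    interval_cases e <;> simp [natPop]
  | succ m ih =>
    intro t e ht he
    have hp : (2:Nat)^(m+1) = 2*2^m := by rw [pow_succ]; ring
    rw [hp] at ht ⊢
    rw [natPop_step (t + e*(2*2^m)), natPop_step t]
    have h1 : (t + e*(2*2^m))/2 = t/2 + e*2^m := by
      rw [show e*(2*2^m) = (e*2^m)*2 from by ring, Nat.add_mul_div_right _ _ (by norm_num : (0:Nat) < 2)]
    have h2 : (t + e*(2*2^m)) % 2 = t % 2 := by
      rw [show e*(2*2^m) = (e*2^m)*2 from by ring, Nat.add_mul_mod_self_right]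
    rw [h1, h2, ih (t/2) e (by omega) he]
    omega

theorem parity3 (a b c : Nat) (ha : a < 2) (hb : b < 2) (hc : c < 2) :
    ((a+b+c) % 2) ^^^ (a ^^^ b) = c := by
  interval_cases a <;> interval_cases b <;> interval_cases c <;> decide

/-- `z & 1` in Python is `z mod 2`. -/
theorem band_one (z : Int) : PySem.Int.band z 1 = z % 2 := by
  rcases z with m | m
  · have h1 : (1:Int) = ((1:Nat):Int) := rfl
    have h2 : (Int.ofNat m) = ((m:Nat):Int) := rfl
    rw [h2, h1, PySem.Int.band_natCast]
    have h3 : m &&& 1 = m % 2 := by simpa using Nat.and_two_pow_sub_one_eq_mod m 1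
    rw [h3]; omega
  · simp only [PySem.Int.band]
    rw [if_neg (by omega), if_pos (by norm_num)]
    have h2 : (-(Int.negSucc m) - 1) = (m:Int) := by rw [Int.negSucc_eq]; ring
    rw [h2, Int.toNat_natCast]
    have h3 : (1:Int).toNat = 1 := rfl
    rw [h3]
    have h4 : 1 &&& m = m % 2 := by
      rw [Nat.land_comm]; simpa using Nat.and_two_pow_sub_one_eq_mod m 1
    rw [h4, Int.negSucc_eq]
    omega

/-- `x & 0xFFFFFFFF` in Python is `x mod 2^32`. -/
theorem band_mask (x : Int) : PySem.Int.band x 4294967295 = x % 4294967296 := by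
  rcases x with m | m
  · have h1 : (4294967295:Int) = ((4294967295:Nat):Int) := by norm_num
    have h2 : (Int.ofNat m) = ((m:Nat):Int) := rfl
    rw [h2, h1, PySem.Int.band_natCast]
    have h3 : m &&& 4294967295 = m % 4294967296 := by
      have := Nat.and_two_pow_sub_one_eq_mod m 32
      norm_num at this
      exact this
    rw [h3]; omega
  · simp only [PySem.Int.band]
    rw [if_neg (by omega), if_pos (by norm_num)]
    have h2 : (-(Int.negSucc m) - 1) = (m:Int) := by rw [Int.negSucc_eq]; ring
    rw [h2, Int.toNat_natCast]
    have h3 : (4294967295:Int).toNat = 4294967295 := rfl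
    rw [h3]
    have h4 : 4294967295 &&& m = m % 4294967296 := by
      rw [Nat.land_comm]
      have := Nat.and_two_pow_sub_one_eq_mod m 32
      norm_num at this
      exact this
    rw [h4, Int.negSucc_eq]
    omega

/-- Bit `k` of `x` (k < 32) equals bit `k` of the 32-bit residue of `x`. -/
theorem bits_eq (x : Int) (k : Nat) (hk : k < 32) :
    PySem.Int.band (x >>> k) 1 = (((x % 4294967296).toNat / 2^k % 2 : Nat) : Int) := by
  rw [band_one]
  have hshift : x >>> k = x / 2^k := by rw [Int.shiftRight_eq_div_pow]; push_cast; rfl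
  rw [hshift]
  have hr0 : 0 ≤ x % 4294967296 := Int.emod_nonneg x (by norm_num)
  have hx : x = 4294967296 * (x / 4294967296) + x % 4294967296 := by omega
  set t : Int := x / 4294967296 with ht
  set r : Int := x % 4294967296 with hrdef
  have h32 : (4294967296:Int) = 2^k * 2^(32-k) := by
    rw [← pow_add, show k + (32-k) = 32 from by omega]
    norm_num
  have hdiv : x / 2^k = r / 2^k + 2^(32-k) * t := by
    have hform : x = r + 2^k * (2^(32-k) * t) := by rw [hx, h32]; ring
    rw [hform, Int.add_mul_ediv_left _ _ (by positivity : ((2:Int)^k) ≠ 0)]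
  rw [hdiv]
  have h31 : (2:Int)^(32-k) * t = 2 * (2^(32-k-1) * t) := by
    rw [show (2:Int)^(32-k) = 2 * 2^(32-k-1) from by rw [← pow_succ']; congr 1; omega]
    ring
  rw [h31, Int.add_mul_emod_self_left]
  set rN : Nat := (x % 4294967296).toNat with hrN
  have hrcast : r = (rN : Int) := by rw [hrdef, hrN, Int.toNat_of_nonneg hr0]
  rw [hrcast]
  have hcastdiv : (rN : Int) / 2^k = ((rN / 2^k : Nat) : Int) := by
    rw [Int.natCast_div]
    push_cast
    rfl
  rw [hcastdiv]
  omega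

theorem step_bit (A B C : Nat) (hA : A < 2) (hB : B < 2) (hC : C < 2) :
    PySem.Int.bor (PySem.Int.band (A:Int) (B:Int))
      (PySem.Int.band (C:Int) (PySem.Int.bxor (A:Int) (B:Int))) = (((A+B+C)/2 : Nat) : Int) := by
  interval_cases A <;> interval_cases B <;> interval_cases C <;> decide

/-- Arithmetic model of A's loop: state after `n` iterations is (carry-count, carry). -/
def loopC (X Y : Nat) : Nat → Nat × Nat
  | 0 => (0, 0)
  | n+1 =>
    let p := loopC X Y n
    let c := (X/2^n % 2 + Y/2^n % 2 + p.2) / 2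
    (p.1 + c, c)

theorem loopC_snd_lt (X Y : Nat) : ∀ n, (loopC X Y n).2 < 2 := by
  intro n
  induction n with
  | zero => simp [loopC]
  | succ n ih =>
    simp only [loopC]
    have ha : X/2^n % 2 < 2 := Nat.mod_lt _ (by norm_num)
    have hb : Y/2^n % 2 < 2 := Nat.mod_lt _ (by norm_num)
    omega

theorem loopC_char (X Y : Nat) : ∀ n,
    (loopC X Y n).2 = (X % 2^n + Y % 2^n) / 2^n ∧
    (loopC X Y n).1 = natPop (((X % 2^n + Y % 2^n) ^^^ X % 2^n) ^^^ Y % 2^n) := by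
  intro n
  induction n with
  | zero => simp [loopC, Nat.mod_one, natPop]
  | succ n ih =>
    obtain ⟨ih2, ih1⟩ := ih
    have hp : (2:Nat)^(n+1) = 2*2^n := by rw [pow_succ]; ring
    have hpow : (0:Nat) < 2^n := by positivity
    set u := X % 2^n with hu_def
    set v := Y % 2^n with hv_def
    set a := X / 2^n % 2 with ha_def
    set b := Y / 2^n % 2 with hb_def
    have hu : u < 2^n := Nat.mod_lt _ hpow
    have hv : v < 2^n := Nat.mod_lt _ hpow
    have ha : a < 2 := Nat.mod_lt _ (by norm_num)
    have hb : b < 2 := Nat.mod_lt _ (by norm_num)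
    set c := (u + v) / 2^n with hc_def
    set r := (u + v) % 2^n with hr_def
    have hsv : u + v = 2^n * c + r := (Nat.div_add_mod _ _).symm
    have hr : r < 2^n := Nat.mod_lt _ hpow
    have hc : c < 2 := by
      rw [hc_def]
      rw [Nat.div_lt_iff_lt_mul hpow]
      omega
    have hX' : X % 2^(n+1) = u + a * 2^n := by rw [Nat.mod_pow_succ]; ring
    have hY' : Y % 2^(n+1) = v + b * 2^n := by rw [Nat.mod_pow_succ]; ring
    set e := (a+b+c) % 2 with he_def
    set c' := (a+b+c) / 2 with hc'_def
    have hdc : a + b + c = 2*c' + e := by omega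
    have he : e < 2 := by omega
    have hc'2 : c' < 2 := by omega
    have huv : u ^^^ v < 2^n := Nat.xor_lt_two_pow hu hv
    have hab : a ^^^ b < 2 := by interval_cases a <;> interval_cases b <;> decide
    -- characterization of the old xor word
    have hT : ((u + v) ^^^ u) ^^^ v = (r ^^^ (u ^^^ v)) + c*2^n := by
      rw [Nat.xor_assoc]
      rw [show u + v = r + c*2^n from by rw [hsv]; ring]
      have hx0 := xor_split n r (u ^^^ v) c 0 hr huv hc (by norm_num)
      simpa using hx0
    have hW : r ^^^ (u ^^^ v) < 2^n := Nat.xor_lt_two_pow hr huv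
    -- the new sum decomposes as r + e*2^n + c'*2^(n+1)
    have hsum : (u + a*2^n) + (v + b*2^n) = (r + e*2^n) + c'*(2*2^n) := by
      calc (u + a*2^n) + (v + b*2^n) = (u + v) + (a+b)*2^n := by ring
        _ = (2^n*c + r) + (a+b)*2^n := by rw [hsv]
        _ = r + (c + (a+b))*2^n := by ring
        _ = r + (e + 2*c')*2^n := by rw [show c + (a+b) = e + 2*c' from by omega]
        _ = (r + e*2^n) + c'*(2*2^n) := by ring
    -- characterization of the new xor word
    have hT' : ((X % 2^(n+1) + Y % 2^(n+1)) ^^^ X % 2^(n+1)) ^^^ Y % 2^(n+1)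
        = ((r ^^^ (u ^^^ v)) + c*2^n) + c'*2^(n+1) := by
      rw [hX', hY', Nat.xor_assoc]
      rw [xor_split n u v a b hu hv ha hb, hsum, hp]
      have hlt1 : r + e*2^n < 2^(n+1) := by rw [hp]; interval_cases e <;> omega
      have hlt2 : (u ^^^ v) + (a ^^^ b)*2^n < 2^(n+1) := by
        rw [hp]; interval_cases hh : (a ^^^ b) <;> omega
      have hx2 := xor_split (n+1) (r + e*2^n) ((u ^^^ v) + (a ^^^ b)*2^n) c' 0 hlt1 hlt2 hc'2
        (by norm_num)
      rw [hp] at hx2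
      simp only [Nat.zero_mul, Nat.add_zero, Nat.xor_zero] at hx2
      rw [hx2]
      rw [xor_split n r (u ^^^ v) e (a ^^^ b) hr huv he hab]
      rw [he_def, parity3 a b c ha hb hc]
    have hTlt : (r ^^^ (u ^^^ v)) + c*2^n < 2^(n+1) := by
      rw [hp]; interval_cases c <;> omega
    constructor
    · -- carry component
      simp only [loopC]
      rw [ih2, ← ha_def, ← hb_def]
      rw [hX', hY']
      have hnum : u + a*2^n + (v + b*2^n) = (a+b+c)*2^n + r := by
        rw [show u + a*2^n + (v + b*2^n) = (u+v) + (a*2^n + b*2^n) from by ring, hsv]; ring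
      rw [hnum, hp]
      rw [show (a+b+c)*2^n + r = 2^n*(a+b+c) + r from by ring,
          show 2*2^n = 2^n*2 from by ring]
      rw [← Nat.div_div_eq_div_mul, Nat.mul_add_div hpow, Nat.div_eq_of_lt hr, Nat.add_zero]
    · -- popcount component
      simp only [loopC]
      rw [ih2, ← ha_def, ← hb_def, ih1, hT, hT']
      rw [pop_split (n+1) _ c' hTlt hc'2]

/-- The Int fold of port A equals the arithmetic model on the 32-bit residues. -/
theorem fold_loop (x y : Int) : ∀ n : Nat, n ≤ 32 →
    ((PySem.List.pyRange 0 (n:Int)).foldl (fun (st : Int × Int) bit =>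
      let a := PySem.Int.band (x >>> bit.toNat) 1
      let b := PySem.Int.band (y >>> bit.toNat) 1
      let carry := PySem.Int.bor (PySem.Int.band a b) (PySem.Int.band st.2 (PySem.Int.bxor a b))
      (st.1 + carry, carry)) ((0 : Int), (0 : Int)))
    = (((loopC (x % 4294967296).toNat (y % 4294967296).toNat n).1 : Int),
       ((loopC (x % 4294967296).toNat (y % 4294967296).toNat n).2 : Int)) := by
  intro n
  induction n with
  | zero => intro _; simp [loopC]
  | succ n ih =>
    intro hn
    have hcast : ((n+1:Nat):Int) = (n:Int) + 1 := by push_cast; ring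
    rw [hcast, PySem.List.pyRange_one_succ_right (by positivity : (0:Int) ≤ (n:Int))]
    rw [List.foldl_append, ih (by omega)]
    simp only [List.foldl_cons, List.foldl_nil]
    rw [Int.toNat_natCast]
    rw [Int.shiftRight_natCast_right x n, Int.shiftRight_natCast_right y n]
    rw [bits_eq x n (by omega), bits_eq y n (by omega)]
    rw [step_bit _ _ _ (Nat.mod_lt _ (by norm_num)) (Nat.mod_lt _ (by norm_num))
      (loopC_snd_lt _ _ _)]
    simp only [loopC]
    constructor

-- ===== VERDICT (by name: the statement is the Claim_ definition above) =====
theorem count_carries_spec : Claim_equal_count_carries := by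
  unfold Claim_equal_count_carries Spec_count_carries
  intro x y _
  have hfold := fold_loop x y 32 (by omega)
  rw [show ((32:Nat):Int) = (32:Int) from by norm_num] at hfold
  unfold count_carries count_carries_alt
  rw [hfold, band_mask x, band_mask y]
  set XN := (x % 4294967296).toNat with hXN_def
  set YN := (y % 4294967296).toNat with hYN_def
  have hx0 : 0 ≤ x % 4294967296 := Int.emod_nonneg x (by norm_num)
  have hy0 : 0 ≤ y % 4294967296 := Int.emod_nonneg y (by norm_num)
  have hxlt : x % 4294967296 < 4294967296 := Int.emod_lt_of_pos x (by norm_num)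
  have hylt : y % 4294967296 < 4294967296 := Int.emod_lt_of_pos y (by norm_num)
  have hXNlt : XN < 2^32 := by rw [hXN_def]; omega
  have hYNlt : YN < 2^32 := by rw [hYN_def]; omega
  have hchar := (loopC_char XN YN 32).2
  rw [Nat.mod_eq_of_lt hXNlt, Nat.mod_eq_of_lt hYNlt] at hchar
  rw [show x % 4294967296 = (XN:Int) from (Int.toNat_of_nonneg hx0).symm,
      show y % 4294967296 = (YN:Int) from (Int.toNat_of_nonneg hy0).symm]
  show ((loopC XN YN 32).1 : Int)
      = (PySem.Int.bitCount (PySem.Int.bxor (PySem.Int.bxor ((XN:Int) + (YN:Int)) (XN:Int)) (YN:Int)) : Int)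
  rw [hchar]
  rw [show (XN:Int) + (YN:Int) = ((XN + YN : Nat):Int) from by push_cast; ring]
  rw [PySem.Int.bxor_natCast, PySem.Int.bxor_natCast, bitCount_natPop]
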